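-- pv_equiv track=rewrite | github.com/Officina-SCIFT/SUHII_mapping | downloader.py | find_cloud_cover_land_field
-- ===== SOURCE A (Python) =====
-- def find_cloud_cover_land_field(filters):
--     """
--     Find the 'cloudCoverLand' field from dataset-filters output.
--     The M2M response is a list of dicts describing fields/filters.
--     We try robust matching on either 'fieldName' or a label mentioning land cloud.
--     """
--     if not filters:
--         return None
--     # Direct match on fieldName
--     for f in filters:
--         if str(f.get("fieldName", "")).strip().lower() == "cloudcover":
--             return f
--
--     # Fallback: look for labels mentioning cloud cover over land
--     keywords = ("cloud cover land", "cloud cover over land", "land cloud")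
--     for f in filters:
--         label = " ".join([
--             str(f.get("fieldLabel", "")),
--             str(f.get("fieldName", "")),
--             str(f.get("additionalInfo", "")),
--         ]).lower()
--         if any(k in label for k in keywords):
--             return f
--
--     return None
-- ===== SOURCE B (Python) =====
-- def find_cloud_cover_land_field(filters):
--     """Single pass: remember the first fallback label match, break on the
--     first exact fieldName match (which always wins)."""
--     if not filters:
--         return None
--     keywords = ("cloud cover land", "cloud cover over land", "land cloud")
--     fallback = None
--     for f in filters:
--         if str(f.get("fieldName", "")).strip().lower() == "cloudcover":
--             return f
--         if fallback is None:
--             label = " ".join([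
--                 str(f.get("fieldLabel", "")),
--                 str(f.get("fieldName", "")),
--                 str(f.get("additionalInfo", "")),
--             ]).lower()
--             if any(k in label for k in keywords):
--                 fallback = f
--     return fallback
-- ===== Notes on version B (the rewrite author's own statement) =====
-- stated objective: alternative
-- what changed: Replaced A's two sequential scans (exact fieldName pass, then label-keyword pass) by one single pass that returns at the first exact match and remembers only the first fallback match.
import Mathlib
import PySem

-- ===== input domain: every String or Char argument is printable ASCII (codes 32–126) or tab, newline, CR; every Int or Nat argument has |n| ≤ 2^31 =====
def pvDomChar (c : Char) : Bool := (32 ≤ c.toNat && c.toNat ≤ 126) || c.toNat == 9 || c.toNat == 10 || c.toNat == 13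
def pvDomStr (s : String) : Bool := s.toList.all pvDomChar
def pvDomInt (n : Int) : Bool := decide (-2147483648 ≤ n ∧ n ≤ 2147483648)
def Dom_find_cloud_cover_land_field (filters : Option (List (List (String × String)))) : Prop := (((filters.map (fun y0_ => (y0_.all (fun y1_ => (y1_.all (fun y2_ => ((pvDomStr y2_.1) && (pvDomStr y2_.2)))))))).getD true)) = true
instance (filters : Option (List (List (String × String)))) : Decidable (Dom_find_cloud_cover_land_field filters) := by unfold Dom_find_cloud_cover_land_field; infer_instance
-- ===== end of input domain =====

-- B replaces A's two sequential scans by one pass that returns at the first exact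
-- fieldName match and remembers the first fallback label match (objective: alternative).

-- ===== PORT A =====
-- f.get(k, "") on an assoc-list dict: first match, default "" (shared by both ports,
-- since both Pythons use the identical expression)
def pvGetD (f : List (String × String)) (k : String) : String :=
  ((f.find? (fun p => p.1 == k)).map (·.2)).getD ""

-- str(f.get("fieldName","")).strip().lower() == "cloudcover"
def pvExact (f : List (String × String)) : Bool :=
  PySem.Str.lower (PySem.Str.strip (pvGetD f "fieldName")) == "cloudcover"

-- keywords = ("cloud cover land", "cloud cover over land", "land cloud")
def pvKeywords : List String := ["cloud cover land", "cloud cover over land", "land cloud"]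

-- label = " ".join([...]).lower(); any(k in label for k in keywords)
def pvFallback (f : List (String × String)) : Bool :=
  let label := PySem.Str.lower (PySem.Str.join " "
    [pvGetD f "fieldLabel", pvGetD f "fieldName", pvGetD f "additionalInfo"])
  pvKeywords.any (fun k => PySem.Str.isIn k label)

def find_cloud_cover_land_field (filters : Option (List (List (String × String)))) : Option (List (String × String)) :=
  match filters with
  | none => none
  | some fs =>
    if fs = [] then none            -- 'if not filters'
    else
      match fs.find? pvExact with   -- first loop: return first exact match
      | some f => some f
      | none => fs.find? pvFallback -- second loop: return first fallback match

-- ===== PORT B =====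
-- single pass: break with f on the first exact match, remember the first fallback match
def pvAltLoop (fallback : Option (List (String × String))) :
    List (List (String × String)) → Option (List (String × String))
  | [] => fallback
  | f :: rest =>
    if pvExact f then some f
    else pvAltLoop (if fallback.isNone && pvFallback f then some f else fallback) rest

def find_cloud_cover_land_field_alt (filters : Option (List (List (String × String)))) : Option (List (String × String)) :=
  match filters with
  | none => none
  | some fs =>
    if fs = [] then none
    else pvAltLoop none fs

-- ===== PRECONDITION & SPEC =====
def Spec_find_cloud_cover_land_field (filters : Option (List (List (String × String)))) (out : Option (List (String × String))) : Prop := out = find_cloud_cover_land_field_alt filters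
instance (filters : Option (List (List (String × String)))) (out : Option (List (String × String))) : Decidable (Spec_find_cloud_cover_land_field filters out) := by unfold Spec_find_cloud_cover_land_field; infer_instance

-- ===== CLAIM (what is proved, stated in full; the proofs are below) =====
def Claim_equal_find_cloud_cover_land_field : Prop := ∀ (filters : Option (List (List (String × String)))), Dom_find_cloud_cover_land_field filters → Spec_find_cloud_cover_land_field filters (find_cloud_cover_land_field filters)

-- ===== LEMMAS AND PROOFS =====
-- invariant of B's loop: exact match wins, otherwise the first-set fallback, otherwise a later fallback
theorem pvAltLoop_eq (fs : List (List (String × String)))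
    (acc : Option (List (String × String))) :
    pvAltLoop acc fs = (fs.find? pvExact).or (acc.or (fs.find? pvFallback)) := by
  induction fs generalizing acc with
  | nil => simp [pvAltLoop]
  | cons f rest ih =>
    simp only [pvAltLoop, List.find?]
    by_cases he : pvExact f
    · simp [he]
    · simp only [he, Bool.false_eq_true, if_false, ih]
      cases acc with
      | some a => simp
      | none =>
        by_cases hf : pvFallback f <;> simp [hf]

-- ===== VERDICT (by name: the statement is the Claim_ definition above) =====
theorem find_cloud_cover_land_field_spec : Claim_equal_find_cloud_cover_land_field := by
  intro filters _
  unfold Spec_find_cloud_cover_land_field find_cloud_cover_land_field find_cloud_cover_land_field_alt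
  cases filters with
  | none => rfl
  | some fs =>
    by_cases h : fs = []
    · simp [h]
    · simp only [h, if_false, pvAltLoop_eq]
      cases fs.find? pvExact <;> simp
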